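-- pv_equiv track=rewrite | github.com/lunarmagnoly/Simple_constructs_MariLT | Simple_constructs_MariLT/defForIsikukood.py | isikukoodKontrollNumber
-- ===== SOURCE A (Python) =====
-- def isikukoodKontrollNumber(isikukood: str) -> bool:
--     """
--     Проверяет подлинность isikukood на основе контрольного числа.
--
--     :param isikukood: Личный код (должен быть строкой из 11 цифр).
--     :rtype: bool(True, если контрольное число верное, иначе False.)
--     """
--     # Проверка длины личного кода
--     if len(isikukood) != 11 or not isikukood.isdigit():
--         return False
--
--     # Весовые коэффициенты
--     weights_1 = [1, 2, 3, 4, 5, 6, 7, 8, 9, 1]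
--     weights_2 = [3, 4, 5, 6, 7, 8, 9, 1, 2, 3]
--
--     # Вычисление первой суммы
--     summa_1 = sum(int(isikukood[i]) * weights_1[i] for i in range(10))
--     jaak_1 = summa_1 % 11
--
--     # Если остаток меньше 10, это контрольное число
--     if jaak_1 != 10:
--         kontroll_number = jaak_1
--     else:
--         # Вычисление второй суммы
--         summa_2 = sum(int(isikukood[i]) * weights_2[i] for i in range(10))
--         jaak_2 = summa_2 % 11
--         kontroll_number = 0 if jaak_2 == 10 else jaak_2
--
--     # Сравнение расчетного контрольного числа с последней цифрой кода
--     return kontroll_number == int(isikukood[10])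
-- ===== SOURCE B (Python) =====
-- def isikukoodKontrollNumber(isikukood: str) -> bool:
--     # Multiplication-free algorithm: the first weighted sum (weights 1..9,1) is
--     # obtained by the telescoping/suffix-sum trick (acc of running suffix totals
--     # gives sum d_i*(i+1); subtract 9*d_9 to turn d_9's weight 10 into 1), and
--     # the second weighted sum is derived algebraically from the first:
--     # summa_2 = summa_1 + 2*(d_0+...+d_9) - 9*(d_7+d_8).
--     if len(isikukood) != 11 or not isikukood.isdigit():
--         return False
--     digits = [int(c) for c in isikukood]
--     running = 0
--     acc = 0
--     for d in reversed(digits[:10]):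
--         running += d
--         acc += running
--     summa_1 = acc - 9 * digits[9]
--     jaak_1 = summa_1 % 11
--     if jaak_1 != 10:
--         kontroll = jaak_1
--     else:
--         summa_2 = summa_1 + 2 * running - 9 * (digits[7] + digits[8])
--         jaak_2 = summa_2 % 11
--         kontroll = 0 if jaak_2 == 10 else jaak_2
--     return kontroll == digits[10]
-- ===== Notes on version B (the rewrite author's own statement) =====
-- stated objective: alternative
-- what changed: Replaces the two weight-table passes of generator sums by a multiplication-free telescoping pass: summing running suffix totals yields sum d_i*(i+1) (adjusted by -9*d_9 for the wrapped last weight), and the second weighted sum is never recomputed but derived algebraically as summa_1 + 2*total - 9*(d_7+d_8).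
import Mathlib
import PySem

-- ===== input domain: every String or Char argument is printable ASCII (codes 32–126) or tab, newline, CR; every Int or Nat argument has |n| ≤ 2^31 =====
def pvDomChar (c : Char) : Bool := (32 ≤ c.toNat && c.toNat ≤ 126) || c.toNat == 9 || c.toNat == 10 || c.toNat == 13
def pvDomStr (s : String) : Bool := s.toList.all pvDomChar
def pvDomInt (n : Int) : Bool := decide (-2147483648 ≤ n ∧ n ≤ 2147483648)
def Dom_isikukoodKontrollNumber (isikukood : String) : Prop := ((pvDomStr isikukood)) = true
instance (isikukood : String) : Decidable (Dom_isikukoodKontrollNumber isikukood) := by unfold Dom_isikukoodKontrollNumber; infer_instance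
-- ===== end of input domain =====

-- B computes the first weighted sum by a multiplication-free telescoping pass over suffix
-- totals and derives the second sum algebraically from the first (objective: alternative).

-- int(isikukood[i]) on an in-range index of the already-validated digit string
def pvDigit (cs : List Char) (i : Int) : Int :=
  (PySem.Int.ofChars? [PySem.List.pyGetD cs i ' ']).getD 0

-- int(c) for a single char (B's comprehension)
def pvDigitC (c : Char) : Int := (PySem.Int.ofChars? [c]).getD 0

-- ===== PORT A =====
def isikukoodKontrollNumber (isikukood : String) : Bool :=
  let cs := isikukood.toList
  if PySem.List.len cs != 11 || !(PySem.Chars.strIsdigit cs) then false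
  else
    let weights1 : List Int := [1, 2, 3, 4, 5, 6, 7, 8, 9, 1]
    let weights2 : List Int := [3, 4, 5, 6, 7, 8, 9, 1, 2, 3]
    let summa1 := ((PySem.List.pyRange 0 10 1).map
      (fun i => pvDigit cs i * PySem.List.pyGetD weights1 i 0)).sum
    let jaak1 := PySem.Int.mod summa1 11
    let kontrollNumber :=
      if jaak1 != 10 then jaak1
      else
        let summa2 := ((PySem.List.pyRange 0 10 1).map
          (fun i => pvDigit cs i * PySem.List.pyGetD weights2 i 0)).sum
        let jaak2 := PySem.Int.mod summa2 11
        if jaak2 == 10 then 0 else jaak2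
    kontrollNumber == pvDigit cs 10

-- ===== PORT B =====
def isikukoodKontrollNumber_alt (isikukood : String) : Bool :=
  let cs := isikukood.toList
  if PySem.List.len cs != 11 || !(PySem.Chars.strIsdigit cs) then false
  else
    let digits := cs.map pvDigitC
    let st := ((PySem.List.slice digits none (some 10)).reverse).foldl
      (fun (st : Int × Int) d => (st.1 + d, st.2 + (st.1 + d))) (0, 0)
    let running := st.1
    let acc := st.2
    let summa1 := acc - 9 * PySem.List.pyGetD digits 9 0
    let jaak1 := PySem.Int.mod summa1 11
    let kontroll :=
      if jaak1 != 10 then jaak1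
      else
        let summa2 := summa1 + 2 * running -
          9 * (PySem.List.pyGetD digits 7 0 + PySem.List.pyGetD digits 8 0)
        let jaak2 := PySem.Int.mod summa2 11
        if jaak2 == 10 then 0 else jaak2
    kontroll == PySem.List.pyGetD digits 10 0

-- ===== PRECONDITION & SPEC =====
def Spec_isikukoodKontrollNumber (isikukood : String) (out : Bool) : Prop := out = isikukoodKontrollNumber_alt isikukood
instance (isikukood : String) (out : Bool) : Decidable (Spec_isikukoodKontrollNumber isikukood out) := by unfold Spec_isikukoodKontrollNumber; infer_instance

-- ===== CLAIM (what is proved, stated in full; the proofs are below) =====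
def Claim_equal_isikukoodKontrollNumber : Prop := ∀ (isikukood : String), Dom_isikukoodKontrollNumber isikukood → Spec_isikukoodKontrollNumber isikukood (isikukoodKontrollNumber isikukood)

-- ===== LEMMAS AND PROOFS =====

-- ===== VERDICT (by name: the statement is the Claim_ definition above) =====
theorem isikukoodKontrollNumber_spec : Claim_equal_isikukoodKontrollNumber := by
  intro s _
  unfold Spec_isikukoodKontrollNumber isikukoodKontrollNumber isikukoodKontrollNumber_alt
  by_cases hg : (PySem.List.len s.toList != 11 || !(PySem.Chars.strIsdigit s.toList)) = true
  · simp only [hg, if_true]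
  · simp only [eq_false_of_ne_true hg, Bool.false_eq_true, if_false]
    have hlen : s.toList.length = 11 := by
      simp only [Bool.or_eq_true, bne_iff_ne, Bool.not_eq_true', not_or, not_not] at hg
      have := hg.1
      simp only [PySem.List.len] at this; exact_mod_cast this
    obtain ⟨c0, c1, c2, c3, c4, c5, c6, c7, c8, c9, c10, rest⟩ :
        ∃ c0 c1 c2 c3 c4 c5 c6 c7 c8 c9 c10,
          s.toList = [c0, c1, c2, c3, c4, c5, c6, c7, c8, c9, c10] := by
      match h : s.toList, hlen with
      | [a0,a1,a2,a3,a4,a5,a6,a7,a8,a9,a10], _ =>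
        exact ⟨a0,a1,a2,a3,a4,a5,a6,a7,a8,a9,a10, rfl⟩
    rw [rest]
    simp only [pvDigit]
    norm_num [PySem.List.pyRange, PySem.List.pyGetD, PySem.List.pyGet?, PySem.List.pyIdx?,
      PySem.List.slice, PySem.Int.mod, List.range_succ, List.foldr, List.take,
      show (2:Int).toNat = 2 from rfl, show (3:Int).toNat = 3 from rfl,
      show (4:Int).toNat = 4 from rfl, show (5:Int).toNat = 5 from rfl,
      show (6:Int).toNat = 6 from rfl, show (7:Int).toNat = 7 from rfl,
      show (8:Int).toNat = 8 from rfl, show (9:Int).toNat = 9 from rfl,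
      show (10:Int).toNat = 10 from rfl]
    simp only [pvDigitC]
    ring_nf
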